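-- pv_equiv track=rewrite | github.com/JiMinwoo/Algorithm | 코테/2021 KAKAO/02.py | first_step
-- ===== SOURCE A (Python) =====
-- dx = [-1,1,0,0]
--
-- dy = [0,0,-1,1]
--
-- def sec_step(graph,fst):
--     while fst:
--         nx, ny = fst.pop()
--         for j in range(4):
--             mx = nx + dx[j]
--             my = ny + dy[j]
--             if mx < 0 or my < 0 or mx >= 5 or my >= 5:
--                 continue
--             if graph[mx][my] == "P":
--                 return 0
--     return 1
--
-- def first_step(graph,a,b):
--     graph[a][b] = "O"
--     fst = []
--     for i in range(4):
--         nx = a + dx[i]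
--         ny = b + dy[i]
--         if nx < 0 or ny < 0 or nx >= 5 or ny >= 5 or graph[nx][ny] == "X":
--             continue
--         if graph[nx][ny] == "O":
--             fst.append((nx,ny))
--         if graph[nx][ny] == "P":
--             return 0
--     if sec_step(graph,fst) == 0:
--         return 0
--     else:
--         return 1
-- ===== SOURCE B (Python) =====
-- def first_step(graph, a, b):
--     # single distance-bounded BFS from the seat instead of A's collect-then-rescan phases
--     graph[a][b] = "O"
--     queue = [(a, b, 0)]
--     while queue:
--         x, y, d = queue.pop(0)
--         for u, v in ((-1, 0), (1, 0), (0, -1), (0, 1)):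
--             nx, ny = x + u, y + v
--             if 0 <= nx < 5 and 0 <= ny < 5 and graph[nx][ny] != "X":
--                 if graph[nx][ny] == "P":
--                     return 0
--                 if graph[nx][ny] == "O" and d + 1 < 2:
--                     queue.append((nx, ny, d + 1))
--     return 1
-- ===== Notes on version B (the rewrite author's own statement) =====
-- stated objective: alternative
-- what changed: A runs two staged scans (a first loop that collects O-neighbours into a list, then a separate sec_step helper that pops and rescans them); B is one distance-bounded BFS: a single FIFO queue of (row,col,dist) seeded with the start cell, returning 0 the moment a P is popped into view and only enqueueing O cells while dist+1 < 2.
-- outside the precondition, e.g. on first_step([['X', 'P', 'X'], ['O', 'O']], 1, 1): A returns 0, B returns 0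
import Mathlib
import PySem

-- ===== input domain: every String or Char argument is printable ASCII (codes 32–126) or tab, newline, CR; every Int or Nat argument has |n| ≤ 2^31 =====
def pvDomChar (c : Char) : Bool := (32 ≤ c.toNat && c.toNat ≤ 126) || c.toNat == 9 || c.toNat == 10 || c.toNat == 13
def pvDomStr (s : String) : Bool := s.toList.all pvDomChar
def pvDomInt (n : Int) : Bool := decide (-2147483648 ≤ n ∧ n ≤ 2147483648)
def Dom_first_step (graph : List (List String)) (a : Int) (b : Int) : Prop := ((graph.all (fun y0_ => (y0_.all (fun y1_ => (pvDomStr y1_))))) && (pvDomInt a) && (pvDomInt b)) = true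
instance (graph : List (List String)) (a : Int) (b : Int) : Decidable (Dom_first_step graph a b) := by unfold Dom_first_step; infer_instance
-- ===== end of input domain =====

-- B replaces A's two-phase collect-a-list-then-rescan structure (first loop + sec_step helper)
-- by a single distance-bounded BFS over one FIFO queue of (row, col, dist) (objective:
-- alternative decomposition; not faster — fixed-size board).
-- Both Pythons mutate graph[a][b] = "O" in place identically; the theorems are about the return value.

-- ===== PORT A =====
-- shared low-level board access (both Pythons read graph[x][y] and assign graph[a][b] = "O");
-- exact for the non-negative in-range indices admitted by Pre_first_step
def cellGet (g : List (List String)) (x y : Int) : String :=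
  (g.getD x.toNat []).getD y.toNat ""

-- graph[a][b] = "O" with Python's index rule (negative index counts from the end);
-- an out-of-range index is IndexError in Python and is excluded by Pre_first_step
def setCell (g : List (List String)) (a b : Int) : List (List String) :=
  let ia := if a < 0 then a + (g.length : Int) else a
  let row := g.getD ia.toNat []
  let ib := if b < 0 then b + (row.length : Int) else b
  g.set ia.toNat (row.set ib.toNat "O")

def dxL : List Int := [-1, 1, 0, 0]
def dyL : List Int := [0, 0, -1, 1]

-- inner 'for j in range(4)' of sec_step: true iff a "P" is found (then sec_step returns 0)
def secInner (g : List (List String)) (nx ny : Int) : List Nat → Bool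
  | [] => false
  | j :: rest =>
    let mx := nx + dxL.getD j 0
    let my := ny + dyL.getD j 0
    if mx < 0 ∨ my < 0 ∨ 5 ≤ mx ∨ 5 ≤ my then secInner g nx ny rest
    else if cellGet g mx my == "P" then true
    else secInner g nx ny rest

-- 'while fst: nx, ny = fst.pop()' — pop() takes the last element, i.e. the head of the reversed list
def secGo (g : List (List String)) : List (Int × Int) → Int
  | [] => 1
  | (nx, ny) :: rest => if secInner g nx ny [0, 1, 2, 3] then 0 else secGo g rest

def sec_step (g : List (List String)) (fst : List (Int × Int)) : Int :=
  secGo g fst.reverse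

-- 'for i in range(4)' of first_step, carrying the accumulated list fst
def firstLoop (g : List (List String)) (a b : Int) : List Nat → List (Int × Int) → Int
  | [], fst => if sec_step g fst == 0 then 0 else 1
  | i :: rest, fst =>
    let nx := a + dxL.getD i 0
    let ny := b + dyL.getD i 0
    if nx < 0 ∨ ny < 0 ∨ 5 ≤ nx ∨ 5 ≤ ny ∨ cellGet g nx ny == "X" then
      firstLoop g a b rest fst
    else
      let fst' := if cellGet g nx ny == "O" then fst ++ [(nx, ny)] else fst
      if cellGet g nx ny == "P" then 0 else firstLoop g a b rest fst'

def first_step (graph : List (List String)) (a : Int) (b : Int) : Int :=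
  firstLoop (setCell graph a b) a b [0, 1, 2, 3] []

-- ===== PORT B =====
-- the inner 'for u, v in ((-1,0),(1,0),(0,-1),(0,1))' of one BFS step: 'none' = found "P"
-- (Python's 'return 0'); 'some adds' = the tuples appended to the queue this step, in order
def scanB (g : List (List String)) (x y d : Int) : List (Int × Int) → Option (List (Int × Int × Int))
  | [] => some []
  | (u, v) :: ds =>
    let nx := x + u
    let ny := y + v
    if 0 ≤ nx ∧ nx < 5 ∧ 0 ≤ ny ∧ ny < 5 ∧ ¬(cellGet g nx ny == "X") then
      if cellGet g nx ny == "P" then none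
      else if cellGet g nx ny == "O" ∧ d + 1 < 2 then
        (scanB g x y d ds).map (fun l => (nx, ny, d + 1) :: l)
      else scanB g x y d ds
    else scanB g x y d ds

-- 'while queue: x, y, d = queue.pop(0) …' — fuel is a totality guard only: the run started by
-- first_step_alt pops at most 1 + 4 cells, so fuel 16 is never exhausted on that call
def bfsB (g : List (List String)) : Nat → List (Int × Int × Int) → Int
  | 0, _ => 1
  | _ + 1, [] => 1
  | f + 1, (x, y, d) :: rest =>
    match scanB g x y d [(-1, 0), (1, 0), (0, -1), (0, 1)] with
    | none => 0
    | some adds => bfsB g f (rest ++ adds)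

def first_step_alt (graph : List (List String)) (a : Int) (b : Int) : Int :=
  bfsB (setCell graph a b) 16 [(a, b, 0)]

-- ===== PRECONDITION & SPEC =====
-- Pre_ = exactly the inputs on which Python A returns: the start index pair is in range for
-- the assignment graph[a][b] = "O" (Python's negative-index rule included), every in-window
-- (5x5) neighbour cell it probes exists, and, for probed cells that hold "O" after the
-- assignment, so does every in-window cell of their own neighbourhoods. (A's early 'return 0'
-- on a "P" can skip a missing later cell; such accidental completions are also excluded.)
def Pre_first_step (graph : List (List String)) (a : Int) (b : Int) : Prop :=
  let n : Int := graph.length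
  let ia := if a < 0 then a + n else a
  0 ≤ ia ∧ ia < n ∧
  (let row := graph.getD ia.toNat []
   let m : Int := row.length
   let ib := if b < 0 then b + m else b
   0 ≤ ib ∧ ib < m ∧
   (∀ d ∈ ([(-1, 0), (1, 0), (0, -1), (0, 1)] : List (Int × Int)),
     (0 ≤ a + d.1 ∧ a + d.1 < 5 ∧ 0 ≤ b + d.2 ∧ b + d.2 < 5) →
       a + d.1 < n ∧ b + d.2 < ((graph.getD (a + d.1).toNat []).length : Int) ∧
       (((a + d.1, b + d.2) = (ia, ib) ∨
         (graph.getD (a + d.1).toNat []).getD (b + d.2).toNat "" = "O") →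
         ∀ e ∈ ([(-1, 0), (1, 0), (0, -1), (0, 1)] : List (Int × Int)),
           (0 ≤ a + d.1 + e.1 ∧ a + d.1 + e.1 < 5 ∧ 0 ≤ b + d.2 + e.2 ∧ b + d.2 + e.2 < 5) →
             a + d.1 + e.1 < n ∧
             b + d.2 + e.2 < ((graph.getD (a + d.1 + e.1).toNat []).length : Int))))
instance (graph : List (List String)) (a : Int) (b : Int) : Decidable (Pre_first_step graph a b) := by
  unfold Pre_first_step; infer_instance

def pvWitness_first_step : List (List String) × Int × Int :=
  ([["X", "O", "X", "O", "X"], ["O", "O", "O", "O", "O"], ["X", "P", "X", "O", "X"],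
    ["O", "O", "O", "O", "O"], ["X", "O", "X", "O", "X"]], 1, 1)

def Spec_first_step (graph : List (List String)) (a : Int) (b : Int) (out : Int) : Prop := out = first_step_alt graph a b
instance (graph : List (List String)) (a : Int) (b : Int) (out : Int) : Decidable (Spec_first_step graph a b out) := by unfold Spec_first_step; infer_instance

-- ===== CLAIM (what is proved, stated in full; the proofs are below) =====
def Claim_equal_first_step : Prop := ∀ (graph : List (List String)) (a : Int) (b : Int), Dom_first_step graph a b → Pre_first_step graph a b → Spec_first_step graph a b (first_step graph a b)

-- ===== LEMMAS AND PROOFS =====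

-- a probed cell at distance one or two, guarded by the 5x5 window
def atomP (g : List (List String)) (x y : Int) : Bool :=
  if 0 ≤ x ∧ x < 5 ∧ 0 ≤ y ∧ y < 5 then cellGet g x y == "P" else false

def oAtom (g : List (List String)) (x y : Int) : Bool :=
  if 0 ≤ x ∧ x < 5 ∧ 0 ≤ y ∧ y < 5 then cellGet g x y == "O" else false

def dirsL : List (Int × Int) := [(-1, 0), (1, 0), (0, -1), (0, 1)]

-- "some in-window neighbour of (x,y) holds P"
def nbrP (g : List (List String)) (x y : Int) : Bool :=
  dirsL.any fun p => atomP g (x + p.1) (y + p.2)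

-- congruence for the common 'if <Bool> then 0 else 1' result shape
theorem ifb_congr {x y : Bool} (h : x = y) :
    (if x = true then (0 : Int) else 1) = if y = true then 0 else 1 := by rw [h]

-- one step of A's inner bounds-then-"P" check, rewritten as a guarded atom
theorem stepA (g : List (List String)) (mx my : Int) (k : Bool) :
    (if mx < 0 ∨ my < 0 ∨ 5 ≤ mx ∨ 5 ≤ my then k
     else if cellGet g mx my == "P" then true else k)
      = (atomP g mx my || k) := by
  unfold atomP
  by_cases hb : 0 ≤ mx ∧ mx < 5 ∧ 0 ≤ my ∧ my < 5
  · rw [if_neg (by omega), if_pos hb]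
    cases h : (cellGet g mx my == "P") <;> simp [h]
  · rw [if_pos (by omega), if_neg hb]
    simp

-- A's inner distance-2 scan agrees with B's "some neighbour holds P"
theorem secInner_eq (g : List (List String)) (nx ny : Int) :
    secInner g nx ny [0, 1, 2, 3] = nbrP g nx ny := by
  simp only [nbrP, dirsL, List.any_cons, List.any_nil]
  simp only [secInner, dxL, dyL,
    show List.getD [(-1 : Int), 1, 0, 0] 0 0 = -1 from rfl,
    show List.getD [(-1 : Int), 1, 0, 0] 1 0 = 1 from rfl,
    show List.getD [(-1 : Int), 1, 0, 0] 2 0 = 0 from rfl,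
    show List.getD [(-1 : Int), 1, 0, 0] 3 0 = 0 from rfl,
    show List.getD [(0 : Int), 0, -1, 1] 0 0 = 0 from rfl,
    show List.getD [(0 : Int), 0, -1, 1] 1 0 = 0 from rfl,
    show List.getD [(0 : Int), 0, -1, 1] 2 0 = -1 from rfl,
    show List.getD [(0 : Int), 0, -1, 1] 3 0 = 1 from rfl]
  rw [stepA, stepA, stepA, stepA]

-- secGo returns 0 iff some queued cell has a "P" next to it
theorem secGo_eq (g : List (List String)) (l : List (Int × Int)) :
    secGo g l = if l.any (fun p => secInner g p.1 p.2 [0, 1, 2, 3]) then 0 else 1 := by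
  induction l with
  | nil => simp [secGo]
  | cons p rest ih =>
    obtain ⟨x, y⟩ := p
    obtain ⟨s0, hs⟩ : ∃ s0, secInner g x y [0, 1, 2, 3] = s0 := ⟨_, rfl⟩
    simp only [secGo, ih, List.any_cons, hs]
    cases s0
    · rw [Bool.false_or]; simp
    · simp

-- the contribution of one probed cell in A's first loop
def fStep (g : List (List String)) (nx ny : Int) : Bool :=
  decide (0 ≤ nx ∧ nx < 5 ∧ 0 ≤ ny ∧ ny < 5) &&
    (cellGet g nx ny == "P" || (cellGet g nx ny == "O" && secInner g nx ny [0, 1, 2, 3]))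

theorem firstLoop_eq (g : List (List String)) (a b : Int) (js : List Nat) (fst : List (Int × Int)) :
    firstLoop g a b js fst =
      if (js.any fun j => fStep g (a + dxL.getD j 0) (b + dyL.getD j 0)) ||
         (fst.any fun p => secInner g p.1 p.2 [0, 1, 2, 3])
      then 0 else 1 := by
  induction js generalizing fst with
  | nil =>
    simp only [firstLoop, sec_step, secGo_eq, List.any_reverse, List.any_nil, Bool.false_or]
    cases fst.any fun p => secInner g p.1 p.2 [0, 1, 2, 3] <;> simp
  | cons j rest ih =>
    simp only [firstLoop, List.any_cons]
    obtain ⟨nx, hnx⟩ : ∃ nx, a + dxL.getD j 0 = nx := ⟨_, rfl⟩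
    obtain ⟨ny, hny⟩ : ∃ ny, b + dyL.getD j 0 = ny := ⟨_, rfl⟩
    simp only [hnx, hny]
    by_cases hb : 0 ≤ nx ∧ nx < 5 ∧ 0 ≤ ny ∧ ny < 5
    · by_cases hx : cellGet g nx ny = "X"
      · have hc : nx < 0 ∨ ny < 0 ∨ 5 ≤ nx ∨ 5 ≤ ny ∨ (cellGet g nx ny == "X") = true := by
          simp [hx]
        rw [if_pos hc, ih]
        have hf : fStep g nx ny = false := by simp [fStep, hx]
        rw [hf, Bool.false_or]
      · have hc : ¬(nx < 0 ∨ ny < 0 ∨ 5 ≤ nx ∨ 5 ≤ ny ∨ (cellGet g nx ny == "X") = true) := by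
          simp only [not_or]
          exact ⟨by omega, by omega, by omega, by omega, by simp [hx]⟩
        rw [if_neg hc]
        by_cases hp : cellGet g nx ny = "P"
        · have hf : fStep g nx ny = true := by simp [fStep, hb, hp]
          have hcp : (cellGet g nx ny == "P") = true := by simp [hp]
          rw [if_pos hcp, hf, Bool.true_or, Bool.true_or, if_pos rfl]
        · have hcp : ¬((cellGet g nx ny == "P") = true) := by simp [hp]
          rw [if_neg hcp]
          by_cases ho : cellGet g nx ny = "O"
          · have hco : (cellGet g nx ny == "O") = true := by simp [ho]
            rw [if_pos hco, ih]
            have hf : fStep g nx ny = secInner g nx ny [0, 1, 2, 3] := by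
              simp [fStep, hb, ho]
            rw [hf]
            apply ifb_congr
            rw [List.any_append]
            cases hs : secInner g nx ny [0, 1, 2, 3] <;> simp [hs]
          · have hco : ¬((cellGet g nx ny == "O") = true) := by simp [ho]
            rw [if_neg hco, ih]
            have hf : fStep g nx ny = false := by simp [fStep, hp, ho]
            rw [hf, Bool.false_or]
    · have hc : nx < 0 ∨ ny < 0 ∨ 5 ≤ nx ∨ 5 ≤ ny ∨ (cellGet g nx ny == "X") = true := by
        have h4 : nx < 0 ∨ ny < 0 ∨ 5 ≤ nx ∨ 5 ≤ ny := by omega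
        tauto
      rw [if_pos hc, ih]
      have hf : fStep g nx ny = false := by simp [fStep, hb]
      rw [hf, Bool.false_or]

-- one direction of B's inner for-loop as a guarded-atom step
theorem scanB_cons (g : List (List String)) (x y d u v : Int) (ds : List (Int × Int)) :
    scanB g x y d ((u, v) :: ds) =
      if atomP g (x + u) (y + v) then none
      else (scanB g x y d ds).map
        (fun l => (if oAtom g (x + u) (y + v) ∧ d + 1 < 2 then [(x + u, y + v, d + 1)] else []) ++ l) := by
  by_cases hb : 0 ≤ x + u ∧ x + u < 5 ∧ 0 ≤ y + v ∧ y + v < 5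
  · by_cases hp : cellGet g (x + u) (y + v) = "P"
    · simp [scanB, atomP, hb, hp]
    · by_cases hx : cellGet g (x + u) (y + v) = "X"
      · cases hsc : scanB g x y d ds <;>
          simp [scanB, atomP, oAtom, hb, hp, hx, hsc]
      · by_cases hd : d + 1 < 2
        · by_cases ho : cellGet g (x + u) (y + v) = "O"
          · cases hsc : scanB g x y d ds <;>
              simp [scanB, atomP, oAtom, hb, hp, hx, ho, hd, hsc]
          · cases hsc : scanB g x y d ds <;>
              simp [scanB, atomP, oAtom, hb, hp, hx, ho, hd, hsc]
        · cases hsc : scanB g x y d ds <;>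
            simp [scanB, atomP, oAtom, hb, hp, hx, hd, hsc]
  · cases hsc : scanB g x y d ds <;>
      simp [scanB, atomP, oAtom, hb, hsc] <;>
      (intro h1 h2 h3 h4; exact absurd ⟨h1, h2, h3, h4⟩ hb)

-- B's whole inner for-loop: 'none' iff some in-window neighbour is "P";
-- otherwise the appended tuples are exactly the guard-passing (O, dist<2) neighbours in order
theorem scanB_chain (g : List (List String)) (x y d : Int) (l : List (Int × Int)) :
    scanB g x y d l =
      if l.any (fun p => atomP g (x + p.1) (y + p.2)) then none
      else some (l.filterMap (fun p =>
        if oAtom g (x + p.1) (y + p.2) ∧ d + 1 < 2 then some (x + p.1, y + p.2, d + 1) else none)) := by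
  induction l with
  | nil => simp [scanB]
  | cons p rest ih =>
    obtain ⟨u, v⟩ := p
    rw [scanB_cons, ih]
    simp only [List.any_cons, List.filterMap_cons]
    by_cases ha : atomP g (x + u) (y + v) = true
    · simp [ha]
    · by_cases hr : (rest.any fun p => atomP g (x + p.1) (y + p.2)) = true
      · simp [ha, hr]
      · by_cases ho : oAtom g (x + u) (y + v) = true ∧ d + 1 < 2
        · simp only [if_pos ho]
          simp [ha, hr]
        · simp only [if_neg ho]
          simp [ha, hr]

-- any / length / membership of a filterMap over an if-some-else-none function
theorem any_filterMap_if {α : Type} (l : List (Int × Int)) (c : Int × Int → Prop)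
    [DecidablePred c] (h : Int × Int → α) (q : α → Bool) :
    ((l.filterMap (fun p => if c p then some (h p) else none)).any q)
      = l.any (fun p => decide (c p) && q (h p)) := by
  induction l with
  | nil => simp
  | cons p rest ih =>
    simp only [List.filterMap_cons, List.any_cons]
    by_cases hc : c p
    · rw [if_pos hc]; simp [hc, ih]
    · rw [if_neg hc]; simp [hc, ih]

theorem length_filterMap_le' {α β : Type} (l : List α) (f : α → Option β) :
    (l.filterMap f).length ≤ l.length := by
  induction l with
  | nil => simp
  | cons p rest ih =>
    simp only [List.filterMap_cons]
    cases f p <;> simp <;> omega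

theorem mem_filterMap_if_third (l : List (Int × Int)) (c : Int × Int → Prop)
    [DecidablePred c] (x y : Int)
    (q : Int × Int × Int) (hq : q ∈ l.filterMap (fun p =>
      if c p then some (x + p.1, y + p.2, (1 : Int)) else none)) : q.2.2 = 1 := by
  rcases List.mem_filterMap.mp hq with ⟨p, _, hp⟩
  by_cases hc : c p
  · rw [if_pos hc] at hp
    cases hp; rfl
  · rw [if_neg hc] at hp; cases hp

-- running the queue after the first pop: every entry has dist 1, so nothing more is enqueued
theorem bfsB_ones (g : List (List String)) (l : List (Int × Int × Int)) (f : Nat)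
    (h1 : ∀ p ∈ l, p.2.2 = 1) (hf : l.length < f) :
    bfsB g f l = if l.any (fun p => nbrP g p.1 p.2.1) then 0 else 1 := by
  induction l generalizing f with
  | nil => cases f with
    | zero => omega
    | succ f => simp [bfsB]
  | cons p rest ih =>
    cases f with
    | zero => omega
    | succ f =>
      obtain ⟨x, y, d⟩ := p
      have hd : d = 1 := h1 (x, y, d) (by simp)
      subst hd
      show (match scanB g x y 1 [(-1, 0), (1, 0), (0, -1), (0, 1)] with
            | none => (0 : Int)
            | some adds => bfsB g f (rest ++ adds)) = _
      rw [show ([(-1, 0), (1, 0), (0, -1), (0, 1)] : List (Int × Int)) = dirsL from rfl,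
          scanB_chain]
      by_cases hn : nbrP g x y = true
      · rw [if_pos (by simpa [nbrP] using hn)]
        simp [List.any_cons, hn]
      · rw [if_neg (by simpa [nbrP] using hn)]
        have hfm : (dirsL.filterMap (fun p =>
            if oAtom g (x + p.1) (y + p.2) = true ∧ (1 : Int) + 1 < 2 then some (x + p.1, y + p.2, (1 : Int) + 1) else none)) = [] := by
          norm_num [dirsL]
        rw [hfm]
        show bfsB g f (rest ++ []) = _
        rw [List.append_nil,
            ih f (fun q hq => h1 q (by simp [hq])) (by simp at hf ⊢; omega)]
        have hn' : nbrP g x y = false := by simpa using hn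
        have hcons : (((x, y, (1 : Int)) :: rest).any fun p => nbrP g p.1 p.2.1)
            = (nbrP g x y || rest.any fun p => nbrP g p.1 p.2.1) := by simp
        rw [hcons, hn', Bool.false_or]

-- interleaved 4-way disjunction regrouped into the two 4-way disjunctions B checks
theorem or_shuffle (x1 y1 x2 y2 x3 y3 x4 y4 : Bool) :
    ((x1 || y1) || ((x2 || y2) || ((x3 || y3) || (x4 || y4)))) =
      ((x1 || (x2 || (x3 || x4))) || (y1 || (y2 || (y3 || y4)))) := by
  revert x1 y1 x2 y2 x3 y3 x4 y4; decide

-- atomP / oAtom spelt with a decide-guard, to line up with fStep's shape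
theorem atomP_decide (g : List (List String)) (x y : Int) :
    atomP g x y = (decide (0 ≤ x ∧ x < 5 ∧ 0 ≤ y ∧ y < 5) && (cellGet g x y == "P")) := by
  unfold atomP; by_cases h : 0 ≤ x ∧ x < 5 ∧ 0 ≤ y ∧ y < 5 <;> simp [h]

theorem oAtom_decide (g : List (List String)) (x y : Int) :
    oAtom g x y = (decide (0 ≤ x ∧ x < 5 ∧ 0 ≤ y ∧ y < 5) && (cellGet g x y == "O")) := by
  unfold oAtom; by_cases h : 0 ≤ x ∧ x < 5 ∧ 0 ≤ y ∧ y < 5 <;> simp [h]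

-- one probed cell of A's first loop = B's distance-1 atom or an O cell with a deep hit
theorem fStep_eq (g : List (List String)) (nx ny : Int) :
    fStep g nx ny = (atomP g nx ny || (oAtom g nx ny && nbrP g nx ny)) := by
  unfold fStep
  rw [secInner_eq, atomP_decide, oAtom_decide]
  cases decide (0 ≤ nx ∧ nx < 5 ∧ 0 ≤ ny ∧ ny < 5) <;> simp

-- A's four-neighbour disjunction regrouped the way B's BFS checks it
theorem any_fStep_eq (g : List (List String)) (a b : Int) :
    ([0, 1, 2, 3].any fun j => fStep g (a + dxL.getD j 0) (b + dyL.getD j 0))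
      = (nbrP g a b || dirsL.any fun p => oAtom g (a + p.1) (b + p.2) && nbrP g (a + p.1) (b + p.2)) := by
  simp only [nbrP, dirsL, List.any_cons, List.any_nil, Bool.or_false,
    show dxL.getD 0 0 = -1 from rfl, show dxL.getD 1 0 = 1 from rfl,
    show dxL.getD 2 0 = 0 from rfl, show dxL.getD 3 0 = 0 from rfl,
    show dyL.getD 0 0 = 0 from rfl, show dyL.getD 1 0 = 0 from rfl,
    show dyL.getD 2 0 = -1 from rfl, show dyL.getD 3 0 = 1 from rfl,
    fStep_eq]
  exact or_shuffle _ _ _ _ _ _ _ _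

-- B's BFS, fully run, agrees with the per-neighbour disjunction A's first loop reduces to
theorem alt_eq (g : List (List String)) (a b : Int) :
    bfsB g 16 [(a, b, 0)] =
      if ([0, 1, 2, 3].any fun j => fStep g (a + dxL.getD j 0) (b + dyL.getD j 0)) then 0 else 1 := by
  rw [any_fStep_eq]
  show (match scanB g a b 0 [(-1, 0), (1, 0), (0, -1), (0, 1)] with
        | none => (0 : Int)
        | some adds => bfsB g 15 ([] ++ adds)) = _
  rw [show ([(-1, 0), (1, 0), (0, -1), (0, 1)] : List (Int × Int)) = dirsL from rfl,
      scanB_chain]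
  by_cases hn : nbrP g a b = true
  · rw [if_pos (by simpa [nbrP] using hn)]
    simp [hn]
  · rw [if_neg (by simpa [nbrP] using hn)]
    have hfm : (dirsL.filterMap (fun p =>
        if oAtom g (a + p.1) (b + p.2) = true ∧ (0 : Int) + 1 < 2 then some (a + p.1, b + p.2, (0 : Int) + 1) else none))
      = dirsL.filterMap (fun p =>
        if oAtom g (a + p.1) (b + p.2) = true then some (a + p.1, b + p.2, (1 : Int)) else none) := by
      apply List.filterMap_congr
      intro p _
      by_cases ho : oAtom g (a + p.1) (b + p.2) = true
      · rw [if_pos ⟨ho, by norm_num⟩, if_pos ho]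
        norm_num
      · rw [if_neg (fun h => ho h.1), if_neg ho]
    rw [hfm]
    show bfsB g 15 ([] ++ _) = _
    rw [List.nil_append]
    rw [bfsB_ones g _ 15
        (fun q hq => mem_filterMap_if_third dirsL _ a b q hq)
        (by have := length_filterMap_le' dirsL (fun p =>
              if oAtom g (a + p.1) (b + p.2) = true then some (a + p.1, b + p.2, (1 : Int)) else none)
            simp [dirsL] at this ⊢; omega)]
    rw [any_filterMap_if]
    have hn' : nbrP g a b = false := by simpa using hn
    have hdec : ∀ bb : Bool, decide (bb = true) = bb := fun bb => by cases bb <;> simp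
    simp only [hdec, hn', Bool.false_or]
-- ===== VERDICT (by name: the statement is the Claim_ definition above) =====
theorem first_step_spec : Claim_equal_first_step := by
  intro graph a b _ _
  show first_step graph a b = first_step_alt graph a b
  rw [first_step, first_step_alt, firstLoop_eq, alt_eq]
  simp only [List.any_nil, Bool.or_false]
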